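-- pv_equiv track=rewrite | github.com/crisweber2600/Lens.Core.Src | _bmad/lens-work/skills/bmad-lens-init-feature/scripts/init-feature-ops.py | build_workspace_scaffold_commands
-- ===== SOURCE A (Python) =====
-- def unique_paths(paths: list[str]) -> list[str]:
--     """Return a stable, de-duplicated list of path strings."""
--     seen: set[str] = set()
--     ordered: list[str] = []
--     for path in paths:
--         if path not in seen:
--             seen.add(path)
--             ordered.append(path)
--     return ordered
--
-- def build_workspace_scaffold_commands(
--     scaffold_entries: list[tuple[str, str]],
--     scope: str,
--     identifier: str,
-- ) -> list[str]:
--     """Return git commands for control-repo scaffold files grouped by workspace root."""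
--     grouped: dict[str, list[str]] = {}
--     for workspace_root, rel_path in scaffold_entries:
--         grouped.setdefault(workspace_root, []).append(rel_path)
--
--     cmds: list[str] = []
--     for workspace_root, rel_paths in grouped.items():
--         unique_rel_paths = unique_paths(rel_paths)
--         noun = "folder" if len(unique_rel_paths) == 1 else "folders"
--         cmds.extend([
--             f"git -C {workspace_root} add {' '.join(unique_rel_paths)}",
--             f'git -C {workspace_root} commit -m "scaffold({scope}): add {identifier} {noun}"',
--         ])
--     return cmds
-- ===== SOURCE B (Python) =====
-- def build_workspace_scaffold_commands(
--     scaffold_entries: list[tuple[str, str]],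
--     scope: str,
--     identifier: str,
-- ) -> list[str]:
--     """Return git commands for control-repo scaffold files grouped by workspace root."""
--     roots = list(dict.fromkeys(root for root, _ in scaffold_entries))
--     cmds: list[str] = []
--     for root in roots:
--         rels = list(dict.fromkeys(rel for r, rel in scaffold_entries if r == root))
--         noun = "folder" if len(rels) == 1 else "folders"
--         cmds.append(f"git -C {root} add {' '.join(rels)}")
--         cmds.append(f'git -C {root} commit -m "scaffold({scope}): add {identifier} {noun}"')
--     return cmds
-- ===== Notes on version B (the rewrite author's own statement) =====
-- stated objective: alternative
-- what changed: Replaces the dict-of-lists grouping plus the separate unique_paths dedup helper by an ordered dedup of the roots followed by one filtered, deduped scan of the entries per root; no intermediate dict or seen-set helper is built.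
import Mathlib
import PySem

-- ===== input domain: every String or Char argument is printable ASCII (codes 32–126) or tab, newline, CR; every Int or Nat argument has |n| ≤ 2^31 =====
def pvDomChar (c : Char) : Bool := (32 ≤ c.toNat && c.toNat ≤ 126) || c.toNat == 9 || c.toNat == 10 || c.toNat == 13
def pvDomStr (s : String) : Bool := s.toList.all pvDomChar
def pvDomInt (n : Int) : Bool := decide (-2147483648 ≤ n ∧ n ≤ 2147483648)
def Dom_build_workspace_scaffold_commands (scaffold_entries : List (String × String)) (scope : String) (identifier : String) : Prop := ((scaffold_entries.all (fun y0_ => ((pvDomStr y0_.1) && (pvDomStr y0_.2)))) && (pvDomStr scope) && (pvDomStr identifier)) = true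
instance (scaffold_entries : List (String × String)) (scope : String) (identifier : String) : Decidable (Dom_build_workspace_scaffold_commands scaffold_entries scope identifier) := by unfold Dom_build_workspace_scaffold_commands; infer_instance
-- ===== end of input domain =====

-- B replaces A's dict-of-lists grouping + separate unique_paths helper by an ordered dedup of the
-- roots and one filtered, deduped scan of the entries per root (alternative decomposition, same results).


-- ===== PORT A =====
-- helper: A's unique_paths, the seen-set/ordered-list loop, step for step
def uniquePaths (paths : List String) : List String :=
  (paths.foldl
    (fun (st : PySem.Set String × List String) path =>
      if PySem.Set.contains st.1 path then st
      else (PySem.Set.add st.1 path, st.2 ++ [path]))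
    (PySem.Set.empty, [])).2

def build_workspace_scaffold_commands (scaffold_entries : List (String × String)) (scope : String) (identifier : String) : List String :=
  -- grouped.setdefault(root, []).append(rel) == d[root] = d.get(root, []) + [rel]
  let grouped : PySem.Dict String (List String) :=
    scaffold_entries.foldl (fun d p => d.modify p.1 [] (· ++ [p.2])) PySem.Dict.empty
  grouped.items.foldl
    (fun cmds item =>
      let unique_rel_paths := uniquePaths item.2
      let noun := if unique_rel_paths.length = 1 then "folder" else "folders"
      cmds ++
        [PySem.Str.join "" ["git -C ", item.1, " add ", PySem.Str.join " " unique_rel_paths],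
         PySem.Str.join "" ["git -C ", item.1, " commit -m \"scaffold(", scope, "): add ", identifier, " ", noun, "\""]])
    []

-- ===== PORT B =====
def build_workspace_scaffold_commands_alt (scaffold_entries : List (String × String)) (scope : String) (identifier : String) : List String :=
  let roots := PySem.List.dedup (scaffold_entries.map (·.1))
  roots.foldl
    (fun cmds root =>
      let rels := PySem.List.dedup ((scaffold_entries.filter (fun p => p.1 == root)).map (·.2))
      let noun := if rels.length = 1 then "folder" else "folders"
      cmds ++
        [PySem.Str.join "" ["git -C ", root, " add ", PySem.Str.join " " rels],
         PySem.Str.join "" ["git -C ", root, " commit -m \"scaffold(", scope, "): add ", identifier, " ", noun, "\""]])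
    []

-- ===== PRECONDITION & SPEC =====
def Spec_build_workspace_scaffold_commands (scaffold_entries : List (String × String)) (scope : String) (identifier : String) (out : List String) : Prop := out = build_workspace_scaffold_commands_alt scaffold_entries scope identifier
instance (scaffold_entries : List (String × String)) (scope : String) (identifier : String) (out : List String) : Decidable (Spec_build_workspace_scaffold_commands scaffold_entries scope identifier out) := by unfold Spec_build_workspace_scaffold_commands; infer_instance

-- ===== CLAIM (what is proved, stated in full; the proofs are below) =====
def Claim_equal_build_workspace_scaffold_commands : Prop := ∀ (scaffold_entries : List (String × String)) (scope : String) (identifier : String), Dom_build_workspace_scaffold_commands scaffold_entries scope identifier → Spec_build_workspace_scaffold_commands scaffold_entries scope identifier (build_workspace_scaffold_commands scaffold_entries scope identifier)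

-- ===== LEMMAS AND PROOFS =====

-- A's seen-set/ordered-list loop keeps seen = ordered, so it is exactly Set.ofList = dedup.
lemma uniquePaths_fold (paths : List String) (s : PySem.Set String) :
    paths.foldl
      (fun (st : PySem.Set String × List String) path =>
        if PySem.Set.contains st.1 path then st
        else (PySem.Set.add st.1 path, st.2 ++ [path]))
      (s, s) = (paths.foldl PySem.Set.add s, paths.foldl PySem.Set.add s) := by
  induction paths generalizing s with
  | nil => rfl
  | cons p rest ih =>
      simp only [List.foldl]
      by_cases h : PySem.Set.contains s p = true
      · have ha : PySem.Set.add s p = s := by simp [PySem.Set.add, PySem.Set.contains] at h ⊢; simp [h]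
        rw [if_pos h, ha, ih]
      · have ha : PySem.Set.add s p = s ++ [p] := by simp [PySem.Set.add, PySem.Set.contains] at h ⊢; simp [h]
        rw [if_neg h, ha, ih]

lemma uniquePaths_eq_dedup (paths : List String) :
    uniquePaths paths = PySem.List.dedup paths := by
  unfold uniquePaths
  have h := uniquePaths_fold paths PySem.Set.empty
  simp only [PySem.Set.empty] at h ⊢
  rw [h]
  simp [PySem.List.dedup_eq_ofList, PySem.Set.ofList_eq_foldl]

-- ===== VERDICT (by name: the statement is the Claim_ definition above) =====
theorem build_workspace_scaffold_commands_spec : Claim_equal_build_workspace_scaffold_commands := by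
  intro entries scope identifier _
  unfold Spec_build_workspace_scaffold_commands
  unfold build_workspace_scaffold_commands build_workspace_scaffold_commands_alt
  have hn : (entries.foldl (fun d p => d.modify p.1 [] (· ++ [p.2]))
      (PySem.Dict.empty : PySem.Dict String (List String))).keys.Nodup := by
    apply PySem.Dict.nodup_keys_foldl_modify_key
    simp
  have hk : (entries.foldl (fun d p => d.modify p.1 [] (· ++ [p.2]))
      (PySem.Dict.empty : PySem.Dict String (List String))).keys
      = PySem.List.dedup (entries.map (·.1)) := by
    rw [PySem.Dict.keys_foldl_modify_key]
    simp [PySem.Set.update_nil_left, PySem.List.dedup_eq_ofList]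
  have hitems : (entries.foldl (fun d p => d.modify p.1 [] (· ++ [p.2]))
      (PySem.Dict.empty : PySem.Dict String (List String))).items
      = (PySem.List.dedup (entries.map (·.1))).map
          (fun k => (k, (entries.filter (fun p => p.1 == k)).map (·.2))) := by
    rw [PySem.Dict.items_eq_map_keys _ hn ([] : List String), hk]
    apply List.map_congr_left
    intro k _
    rw [PySem.Dict.getD_foldl_modify_append]
    simp
  dsimp only
  rw [hitems, List.foldl_map]
  congr 1
  funext cmds k
  simp only [uniquePaths_eq_dedup]
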